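-- pv_equiv track=rewrite | github.com/nikitin-p/t2t-mappability | bin/findunmappable.py | array_to_bed
-- ===== SOURCE A (Python) =====
-- def array_to_bed(arr):
--     out = []
--     pair = []
--     for i in range(len(arr)):
--         if i == 0:
--             prev = True
--         else:
--             prev = arr[i-1]
--         if arr[i]==False and prev==True:
--             pair.append(i)
--         if arr[i]==True and prev==False:
--             pair.append(i-1)
--             out.append(pair)
--             pair=[]
--         if i == len(arr)-1 and arr[i]==False:
--             pair.append(i)
--             out.append(pair)
--             pair=[]
--     return out
-- ===== SOURCE B (Python) =====
-- def array_to_bed(arr):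
--     # Run-decomposition: scan each maximal run of equal values, emit
--     # [start, end] for the False runs. Same return value as the prev/pair
--     # state machine.
--     out = []
--     i, n = 0, len(arr)
--     while i < n:
--         b = arr[i]
--         j = i + 1
--         while j < n and arr[j] == b:
--             j += 1
--         if not b:
--             out.append([i, j - 1])
--         i = j
--     return out
-- ===== Notes on version B (the rewrite author's own statement) =====
-- stated objective: alternative
-- what changed: Replaces A's per-index prev/pair state machine (three condition tests and a re-read of arr[i-1] at every index) with a run-decomposition: scan each maximal run of equal values once and emit [start, end] for the False runs.
import Mathlib
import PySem

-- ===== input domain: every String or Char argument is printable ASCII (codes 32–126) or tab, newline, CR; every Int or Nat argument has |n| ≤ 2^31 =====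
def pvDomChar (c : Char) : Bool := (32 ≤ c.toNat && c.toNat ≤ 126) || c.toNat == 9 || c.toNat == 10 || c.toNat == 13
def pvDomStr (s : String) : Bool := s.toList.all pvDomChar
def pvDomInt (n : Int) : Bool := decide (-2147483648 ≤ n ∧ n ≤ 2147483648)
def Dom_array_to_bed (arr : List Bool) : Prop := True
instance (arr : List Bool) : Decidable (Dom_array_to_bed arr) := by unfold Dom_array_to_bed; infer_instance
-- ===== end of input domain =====

-- B replaces A's per-index prev/pair state machine with a run-decomposition
-- (maximal runs of equal values, emitting [start, end] for False runs); same
-- return value on every input (objective: alternative).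

-- ===== PORT A =====
-- one iteration of A's for-loop; arr[i] / arr[i-1] are always in range here,
-- so pyGetD with an arbitrary default is exact
def aStep (arr : List Bool) (st : List (List Int) × List Int) (i : Int) :
    List (List Int) × List Int :=
  let prev : Bool := if i = 0 then true else PySem.List.pyGetD arr (i - 1) true
  let cur : Bool := PySem.List.pyGetD arr i true
  let st1 := if cur = false ∧ prev = true then (st.1, st.2 ++ [i]) else st
  let st2 := if cur = true ∧ prev = false then (st1.1 ++ [st1.2 ++ [i - 1]], ([] : List Int)) else st1
  if i = (arr.length : Int) - 1 ∧ cur = false then (st2.1 ++ [st2.2 ++ [i]], ([] : List Int)) else st2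

def array_to_bed (arr : List Bool) : List (List Int) :=
  ((PySem.List.pyRange 0 (arr.length : Int) 1).foldl (aStep arr) ([], [])).1

-- ===== PORT B =====
-- Source B's outer while-loop: consume one maximal run of equal values per call;
-- the inner scan 'j += 1 while arr[j] == b' is ported as takeWhile/dropWhile on
-- the remaining suffix (exact: both stop at the first mismatching element)
def altGo : List Bool → Int → List (List Int) → List (List Int)
  | [], _, out => out
  | b :: rest, pos, out =>
    let k : Int := 1 + ((rest.takeWhile (· == b)).length : Int)
    let out' := if b = false then out ++ [[pos, pos + k - 1]] else out
    altGo (rest.dropWhile (· == b)) (pos + k) out'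
termination_by l => l.length
decreasing_by
  simpa using Nat.lt_succ_of_le (List.length_dropWhile_le _ _)

def array_to_bed_alt (arr : List Bool) : List (List Int) := altGo arr 0 []

-- ===== PRECONDITION & SPEC =====
def Spec_array_to_bed (arr : List Bool) (out : List (List Int)) : Prop := out = array_to_bed_alt arr
instance (arr : List Bool) (out : List (List Int)) : Decidable (Spec_array_to_bed arr out) := by unfold Spec_array_to_bed; infer_instance

-- ===== CLAIM (what is proved, stated in full; the proofs are below) =====
def Claim_equal_array_to_bed : Prop := ∀ (arr : List Bool), Dom_array_to_bed arr → Spec_array_to_bed arr (array_to_bed arr)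

-- ===== LEMMAS AND PROOFS =====

-- reference function: remaining output of the scan, given the position and the
-- pending start of an open False run
def ref : List Bool → Int → Option Int → List (List Int)
  | [], _, none => []
  | [], pos, some s => [[s, pos - 1]]
  | true :: rest, pos, none => ref rest (pos + 1) none
  | true :: rest, pos, some s => [s, pos - 1] :: ref rest (pos + 1) none
  | false :: rest, pos, none => ref rest (pos + 1) (some pos)
  | false :: rest, pos, some s => ref rest (pos + 1) (some s)

def encode : Option Int → List Int
  | none => []
  | some s => [s]

-- arr[i] at the boundary between pre and the suffix
lemma pyGetD_len (pre suf : List Bool) (b : Bool) (d : Bool) :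
    PySem.List.pyGetD (pre ++ b :: suf) ((pre.length : Nat) : Int) d = b := by
  rw [PySem.List.pyGetD_natCast]
  simp [List.getD]

-- arr[i-1] is the last element of pre
lemma pyGetD_pred (pre suf : List Bool) (x : Bool) (d : Bool) (h : pre.getLast? = some x) :
    PySem.List.pyGetD (pre ++ suf) ((pre.length : Int) - 1) d = x := by
  obtain ⟨p, rfl⟩ := List.getLast?_eq_some_iff.mp h
  have : ((p ++ [x]).length : Int) - 1 = ((p.length : Nat) : Int) := by simp
  rw [this, List.append_assoc]
  exact pyGetD_len p suf x d

-- A's fold from position pre.length, pending run encoded in the pair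
lemma LA : ∀ (suf pre : List Bool) (out : List (List Int)) (pend : Option Int),
    (pend = none → (pre = [] ∨ pre.getLast? = some true)) →
    (∀ s, pend = some s → pre.getLast? = some false ∧ suf ≠ []) →
    ((PySem.List.pyRange (pre.length : Int) (((pre ++ suf).length : Nat) : Int) 1).foldl
        (aStep (pre ++ suf)) (out, encode pend)).1
      = out ++ ref suf (pre.length : Int) pend := by
  intro suf
  induction suf with
  | nil =>
    intro pre out pend h0 h1
    cases pend with
    | some s => exact absurd rfl (h1 s rfl).2
    | none =>
      rw [PySem.List.pyRange_one_eq_nil (by simp)]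
      simp [ref, encode]
  | cons b rest ih =>
    intro pre out pend h0 h1
    have hlt : (pre.length : Int) < (((pre ++ b :: rest).length : Nat) : Int) := by
      simp only [List.length_append, List.length_cons]
      push_cast
      omega
    rw [PySem.List.pyRange_one_cons hlt, List.foldl_cons]
    have hcur : PySem.List.pyGetD (pre ++ b :: rest) ((pre.length : Nat) : Int) true = b :=
      pyGetD_len pre rest b true
    cases pend with
    | none =>
      have hprev : (if (pre.length : Int) = 0 then true
          else PySem.List.pyGetD (pre ++ b :: rest) ((pre.length : Int) - 1) true) = true := by
        rcases h0 rfl with h | h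
        · subst h; simp
        · have hne : pre ≠ [] := by intro hc; simp [hc] at h
          have hl0 : ¬ ((pre.length : Int) = 0) := by
            intro hc
            exact hne (List.length_eq_zero_iff.mp (by exact_mod_cast hc))
          rw [if_neg hl0]
          exact pyGetD_pred pre _ true true h
      cases b with
      | true =>
        have hstep : aStep (pre ++ true :: rest) (out, encode none) (pre.length : Int)
            = (out, encode none) := by
          simp only [aStep]
          rw [hcur, hprev]
          simp [encode]
        rw [hstep]
        have this1 := ih (pre ++ [true]) out none
          (fun _ => Or.inr (by simp))
          (fun s hs => by simp at hs)
        rw [show (pre ++ [true]) ++ rest = pre ++ true :: rest by simp] at this1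
        rw [show (((pre ++ [true]).length : Nat) : Int) = (pre.length : Int) + 1 by simp] at this1
        rw [show ref (true :: rest) ((pre.length : Int)) none
            = ref rest ((pre.length : Int) + 1) none from rfl]
        exact this1
      | false =>
        cases rest with
        | nil =>
          have hlastEq : ((pre.length : Int)) = (((pre ++ [false]).length : Nat) : Int) - 1 := by
            simp
          have hstep : aStep (pre ++ [false]) (out, encode none) (pre.length : Int)
              = (out ++ [[ (pre.length : Int), (pre.length : Int) ]], []) := by
            simp only [aStep]
            rw [hcur, hprev]
            simp [encode]
          rw [hstep, PySem.List.pyRange_one_eq_nil (by simp)]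
          simp [ref]
        | cons c rest' =>
          have hne : ¬ (((pre.length : Int)) = (((pre ++ false :: c :: rest').length : Nat) : Int) - 1) := by
            simp only [List.length_append, List.length_cons]
            push_cast
            omega
          have hstep : aStep (pre ++ false :: c :: rest') (out, encode none) (pre.length : Int)
              = (out, encode (some (pre.length : Int))) := by
            simp only [aStep]
            rw [hcur, hprev]
            simp [encode]
            omega
          rw [hstep]
          have this1 := ih (pre ++ [false]) out (some (pre.length : Int))
            (fun h => by simp at h)
            (fun s hs => ⟨by simp, by simp⟩)
          rw [show (pre ++ [false]) ++ (c :: rest') = pre ++ false :: c :: rest' by simp] at this1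
          rw [show (((pre ++ [false]).length : Nat) : Int) = (pre.length : Int) + 1 by simp] at this1
          rw [show ref (false :: c :: rest') ((pre.length : Int)) none
              = ref (c :: rest') ((pre.length : Int) + 1) (some ((pre.length : Int))) from rfl]
          exact this1
    | some s =>
      obtain ⟨hlastf, -⟩ := h1 s rfl
      have hne0 : pre ≠ [] := by intro hc; simp [hc] at hlastf
      have hl0 : ¬ ((pre.length : Int) = 0) := by
        intro hc
        exact hne0 (List.length_eq_zero_iff.mp (by exact_mod_cast hc))
      have hprev : (if (pre.length : Int) = 0 then true
          else PySem.List.pyGetD (pre ++ b :: rest) ((pre.length : Int) - 1) true) = false := by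
        rw [if_neg hl0]
        exact pyGetD_pred pre _ false true hlastf
      cases b with
      | true =>
        have hstep : aStep (pre ++ true :: rest) (out, encode (some s)) (pre.length : Int)
            = (out ++ [[s, (pre.length : Int) - 1]], encode none) := by
          simp only [aStep]
          rw [hcur, hprev]
          simp [encode]
        rw [hstep]
        have this1 := ih (pre ++ [true]) (out ++ [[s, (pre.length : Int) - 1]]) none
          (fun _ => Or.inr (by simp))
          (fun t hs => by simp at hs)
        rw [show (pre ++ [true]) ++ rest = pre ++ true :: rest by simp] at this1
        rw [show (((pre ++ [true]).length : Nat) : Int) = (pre.length : Int) + 1 by simp] at this1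
        rw [show ref (true :: rest) ((pre.length : Int)) (some s)
            = [s, (pre.length : Int) - 1] :: ref rest ((pre.length : Int) + 1) none from rfl]
        rw [this1, List.append_assoc]
        rfl
      | false =>
        cases rest with
        | nil =>
          have hlastEq : ((pre.length : Int)) = (((pre ++ [false]).length : Nat) : Int) - 1 := by
            simp
          have hstep : aStep (pre ++ [false]) (out, encode (some s)) (pre.length : Int)
              = (out ++ [[s, (pre.length : Int)]], []) := by
            simp only [aStep]
            rw [hcur, hprev]
            simp [encode]
          rw [hstep, PySem.List.pyRange_one_eq_nil (by simp)]
          simp [ref]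
        | cons c rest' =>
          have hne : ¬ (((pre.length : Int)) = (((pre ++ false :: c :: rest').length : Nat) : Int) - 1) := by
            simp only [List.length_append, List.length_cons]
            push_cast
            omega
          have hstep : aStep (pre ++ false :: c :: rest') (out, encode (some s)) (pre.length : Int)
              = (out, encode (some s)) := by
            simp only [aStep]
            rw [hcur, hprev]
            simp [encode]
            omega
          rw [hstep]
          have this1 := ih (pre ++ [false]) out (some s)
            (fun h => by simp at h)
            (fun t hs => ⟨by simp, by simp⟩)
          rw [show (pre ++ [false]) ++ (c :: rest') = pre ++ false :: c :: rest' by simp] at this1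
          rw [show (((pre ++ [false]).length : Nat) : Int) = (pre.length : Int) + 1 by simp] at this1
          rw [show ref (false :: c :: rest') ((pre.length : Int)) (some s)
              = ref (c :: rest') ((pre.length : Int) + 1) (some s) from rfl]
          exact this1

-- skipping a True run does not change ref's output
lemma refT : ∀ (rest : List Bool) (p : Int),
    ref rest p none
      = ref (rest.dropWhile (· == true)) (p + ((rest.takeWhile (· == true)).length : Int)) none := by
  intro rest
  induction rest with
  | nil => intro p; norm_num
  | cons c r ih =>
    intro p
    cases c with
    | true =>
      simp only [List.dropWhile_cons, List.takeWhile_cons]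
      simp only [beq_self_eq_true, if_true]
      rw [show ref (true :: r) p none = ref r (p + 1) none from rfl, ih (p + 1)]
      simp; ring_nf
    | false =>
      simp

-- a pending False run closes at the end of the current False run
lemma refF : ∀ (rest : List Bool) (p s : Int),
    ref rest p (some s)
      = [s, p + ((rest.takeWhile (· == false)).length : Int) - 1]
        :: ref (rest.dropWhile (· == false)) (p + ((rest.takeWhile (· == false)).length : Int)) none := by
  intro rest
  induction rest with
  | nil => intro p s; simp [List.dropWhile, List.takeWhile, ref]
  | cons c r ih =>
    intro p s
    cases c with
    | true => simp [ref]
    | false =>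
      simp only [List.dropWhile_cons, List.takeWhile_cons]
      simp only [beq_self_eq_true, if_true]
      rw [show ref (false :: r) p (some s) = ref r (p + 1) (some s) from rfl, ih (p + 1) s]
      simp; constructor <;> ring_nf

-- B's loop accumulates exactly ref
lemma LB : ∀ (l : List Bool) (pos : Int) (out : List (List Int)),
    altGo l pos out = out ++ ref l pos none := by
  intro l pos out
  induction l, pos, out using altGo.induct with
  | case1 pos out => simp [altGo, ref]
  | case2 b rest pos out k out' ih =>
    rw [altGo]
    cases b with
    | true =>
      rw [if_neg (by simp)]
      simp only [k, out', dif_neg (show ¬((true : Bool) = false) by simp)] at ih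
      rw [ih, show ref (true :: rest) pos none = ref rest (pos + 1) none from rfl,
        refT rest (pos + 1), add_assoc]
    | false =>
      rw [if_pos rfl]
      simp only [k, out', dif_pos rfl] at ih
      rw [ih, show ref (false :: rest) pos none = ref rest (pos + 1) (some pos) from rfl,
        refF rest (pos + 1) pos]
      simp [add_assoc]

-- ===== VERDICT (by name: the statement is the Claim_ definition above) =====
theorem array_to_bed_spec : Claim_equal_array_to_bed := by
  intro arr _
  unfold Spec_array_to_bed array_to_bed array_to_bed_alt
  have hA := LA arr [] [] none (fun _ => Or.inl rfl) (fun s hs => by simp at hs)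
  simp only [List.nil_append, List.length_nil, Nat.cast_zero, encode] at hA
  rw [hA, LB arr 0 []]
  simp
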